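-- pv_equiv track=rewrite | github.com/pbedn/puzzle-library | py-checkio/8-sendgrid/stressful-subject.py | is_stressful
-- ===== SOURCE A (Python) =====
-- def is_stressful(subj):
--     """
--     recoognise stressful subject
--     """
--     if subj[-3:] == "!!!" or subj.isupper():
--         return True
--
--     words = ["help", "asap", "urgent"]
--     sep = ["!", "-", "."]
--     s = ""
--     previous = None
--
--     for char in subj:
--         if not (char in sep or previous == char):
--             s += char.lower()
--         previous = char
--
--     if any(word in s for word in words):
--         return True
--     return False
-- ===== SOURCE B (Python) =====
-- def _matches(word, subj):
--     # streaming nondeterministic substring automaton: st holds the lengths of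
--     # all prefixes of `word` currently matched; the separator/duplicate filter
--     # is fused into the scan, so the cleaned string is never materialised
--     previous = None
--     st = []
--     for char in subj:
--         if char not in "!-." and char != previous:
--             c = char.lower()
--             st = [p + 1 for p in st if word[p] == c]
--             if word[0] == c:
--                 st.append(1)
--             if len(word) in st:
--                 return True
--         previous = char
--     return False
--
--
-- def is_stressful(subj):
--     """
--     recoognise stressful subject
--     """
--     if subj[-3:] == "!!!" or subj.isupper():
--         return True
--     return any(_matches(word, subj) for word in ("help", "asap", "urgent"))
-- ===== Notes on version B (the rewrite author's own statement) =====
-- stated objective: alternative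
-- what changed: Instead of building the cleaned string and then running substring search, B runs for each keyword a streaming nondeterministic substring automaton (set of matched-prefix lengths) directly over the raw subject, fusing the separator/duplicate filter into the scan so the cleaned string is never materialised.
import Mathlib
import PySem

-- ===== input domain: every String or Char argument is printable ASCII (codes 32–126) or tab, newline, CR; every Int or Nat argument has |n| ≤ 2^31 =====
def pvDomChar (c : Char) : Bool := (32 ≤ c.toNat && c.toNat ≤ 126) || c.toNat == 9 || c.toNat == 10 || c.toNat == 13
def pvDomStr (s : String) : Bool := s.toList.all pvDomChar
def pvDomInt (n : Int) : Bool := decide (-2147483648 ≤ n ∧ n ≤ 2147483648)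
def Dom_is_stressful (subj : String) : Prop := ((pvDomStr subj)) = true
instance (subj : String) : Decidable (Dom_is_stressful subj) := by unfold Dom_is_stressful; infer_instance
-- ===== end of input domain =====

-- B replaces A's build-cleaned-string-then-substring-search by a per-keyword streaming substring automaton fused with the separator/duplicate filter (alternative algorithm, same results).


-- Python str.isupper(): at least one cased character and no lowercase one; exact on the ASCII domain
def pyStrIsUpper (cs : List Char) : Bool :=
  cs.any PySem.Chars.isupper && !cs.any PySem.Chars.islower

-- 'char in "!-."': exact, every separator is a single character
def sepChars : List Char := ['!', '-', '.']

def stressWords : List (List Char) := ["help".toList, "asap".toList, "urgent".toList]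

-- ===== PORT A =====
def is_stressful (subj : String) : Bool :=
  let cs := subj.toList
  if PySem.List.slice cs (some (-3)) none = ['!', '!', '!'] || pyStrIsUpper cs then
    true
  else
    -- s, previous accumulated through the for-loop as a pair
    let st := cs.foldl (fun (st : List Char × Option Char) char =>
      if !(sepChars.contains char || st.2 == some char) then
        (st.1 ++ [PySem.Chars.lowerChar char], some char)
      else (st.1, some char)) ([], none)
    if stressWords.any (fun w => PySem.Chars.isIn w st.1) then true else false

-- ===== PORT B =====
-- _matches: streaming automaton; st holds the lengths of all prefixes of w matched
-- so far; recursion models the early 'return True'. w[p] with p always in range is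
-- ported as getD (exact under that invariant).
def matchRun (w : List Char) (prev : Option Char) (st : List Nat) : List Char → Bool
  | [] => false
  | c :: cs =>
    if !sepChars.contains c && !(prev == some c) then
      let lc := PySem.Chars.lowerChar c
      let st1 := (st.filter (fun p => w.getD p 'a' == lc)).map (· + 1)
      let st2 := if w.headD 'a' == lc then st1 ++ [1] else st1
      if st2.contains w.length then true else matchRun w (some c) st2 cs
    else matchRun w (some c) st cs

def is_stressful_alt (subj : String) : Bool :=
  let cs := subj.toList
  if PySem.List.slice cs (some (-3)) none = ['!', '!', '!'] || pyStrIsUpper cs then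
    true
  else
    stressWords.any (fun w => matchRun w none [] cs)

-- ===== PRECONDITION & SPEC =====
def Spec_is_stressful (subj : String) (out : Bool) : Prop := out = is_stressful_alt subj
instance (subj : String) (out : Bool) : Decidable (Spec_is_stressful subj out) := by unfold Spec_is_stressful; infer_instance

-- ===== CLAIM (what is proved, stated in full; the proofs are below) =====
def Claim_equal_is_stressful : Prop := ∀ (subj : String), Dom_is_stressful subj → Spec_is_stressful subj (is_stressful subj)

-- ===== LEMMAS AND PROOFS =====

-- the characters A's loop appends, starting from a given 'previous'
def keepA (prev : Option Char) : List Char → List Char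
  | [] => []
  | c :: cs =>
      (if sepChars.contains c || prev == some c then [] else [PySem.Chars.lowerChar c])
        ++ keepA (some c) cs

theorem if_true_false (b : Bool) : (if b = true then true else false) = b := by
  cases b <;> simp

theorem foldl_keep (cs : List Char) : ∀ (acc : List Char) (prev : Option Char),
    (cs.foldl (fun (st : List Char × Option Char) char =>
      if !(sepChars.contains char || st.2 == some char) then
        (st.1 ++ [PySem.Chars.lowerChar char], some char)
      else (st.1, some char)) (acc, prev)).1 = acc ++ keepA prev cs := by
  induction cs with
  | nil => intro acc prev; simp [keepA]
  | cons c cs ih =>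
    intro acc prev
    rw [List.foldl_cons]
    cases hb : (sepChars.contains c || prev == some c) with
    | true => rw [if_neg (by simp), ih]; simp only [keepA]; rw [hb]; simp
    | false => rw [if_pos (by simp), ih]; simp only [keepA]; rw [hb]; simp

-- suffix over a snoc on both sides
theorem suffix_concat_concat {α : Type} (a b : List α) (x y : α) :
    (a ++ [x]) <:+ (b ++ [y]) ↔ x = y ∧ a <:+ b := by
  rw [← List.reverse_prefix, ← List.reverse_prefix]
  simp [List.reverse_append, List.cons_prefix_cons]

-- infix over a snoc: an infix of b ++ [x] is an infix of b or a suffix of b ++ [x]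
theorem infix_concat_iff {α : Type} (w b : List α) (x : α) :
    w <:+: (b ++ [x]) ↔ w <:+: b ∨ w <:+ (b ++ [x]) := by
  have e : (b ++ [x]).reverse = x :: b.reverse := by simp
  constructor
  · intro h
    have h1 : w.reverse <:+: x :: b.reverse := by
      rw [← e, List.reverse_infix]; exact h
    rcases List.infix_cons_iff.mp h1 with h2 | h2
    · right
      have h3 : w.reverse <+: (b ++ [x]).reverse := by rw [e]; exact h2
      exact List.reverse_prefix.mp h3
    · left; exact List.reverse_infix.mp h2
  · rintro (h | h)
    · exact h.trans (List.prefix_append b [x]).isInfix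
    · exact h.isInfix

-- step characterization of the automaton state
theorem step_mem (w : List Char) (hw : w ≠ []) (st : List Nat) (seen : List Char) (lc : Char)
    (hst : ∀ k, k ∈ st ↔ (1 ≤ k ∧ k < w.length ∧ w.take k <:+ seen)) :
    ∀ k, (k ∈ (if w.headD 'a' == lc then
          ((st.filter (fun p => w.getD p 'a' == lc)).map (· + 1)) ++ [1]
        else ((st.filter (fun p => w.getD p 'a' == lc)).map (· + 1))))
      ↔ (1 ≤ k ∧ k ≤ w.length ∧ w.take k <:+ (seen ++ [lc])) := by
  intro k
  have hmem1 : k ∈ (st.filter (fun p => w.getD p 'a' == lc)).map (· + 1)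
      ↔ ∃ p, p ∈ st ∧ w.getD p 'a' = lc ∧ p + 1 = k := by
    simp [List.mem_map, List.mem_filter]
    constructor
    · rintro ⟨p, ⟨hp, he⟩, hk⟩; exact ⟨p, hp, he, hk⟩
    · rintro ⟨p, hp, he, hk⟩; exact ⟨p, ⟨hp, he⟩, hk⟩
  have key : ∀ p, p < w.length →
      (w.take (p + 1) <:+ (seen ++ [lc]) ↔ (w.getD p 'a' = lc ∧ w.take p <:+ seen)) := by
    intro p hp
    have : w.take (p + 1) = w.take p ++ [w.getD p 'a'] := by
      rw [List.take_add_one]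
      congr 1
      rw [List.getElem?_eq_getElem hp]
      simp [hp]
    rw [this, suffix_concat_concat]
  constructor
  · intro hk
    by_cases hh : w.headD 'a' = lc
    · rw [if_pos (by simpa using hh)] at hk
      rcases List.mem_append.mp hk with hk | hk
      · rcases hmem1.mp hk with ⟨p, hp, he, rfl⟩
        rcases (hst p).mp hp with ⟨hp1, hp2, hp3⟩
        refine ⟨by omega, by omega, ?_⟩
        exact (key p hp2).mpr ⟨he, hp3⟩
      · simp at hk; subst hk
        have hwl : 0 < w.length := List.length_pos_iff.mpr hw
        refine ⟨le_refl _, by omega, ?_⟩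
        refine (key 0 hwl).mpr ⟨?_, by simp⟩
        cases w with
        | nil => exact absurd rfl hw
        | cons a t => simpa using hh
    · rw [if_neg (by simpa using hh)] at hk
      rcases hmem1.mp hk with ⟨p, hp, he, rfl⟩
      rcases (hst p).mp hp with ⟨hp1, hp2, hp3⟩
      exact ⟨by omega, by omega, (key p hp2).mpr ⟨he, hp3⟩⟩
  · rintro ⟨hk1, hk2, hk3⟩
    obtain ⟨p, rfl⟩ : ∃ p, k = p + 1 := ⟨k - 1, by omega⟩
    have hp : p < w.length := by omega
    obtain ⟨he, hsuf⟩ := (key p hp).mp hk3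
    by_cases hp0 : p = 0
    · subst hp0
      have hh : w.headD 'a' = lc := by
        cases w with
        | nil => exact absurd rfl hw
        | cons a t => simpa using he
      rw [if_pos (by simpa using hh)]
      exact List.mem_append.mpr (Or.inr (by simp))
    · have hmem : p ∈ st := (hst p).mpr ⟨by omega, hp, hsuf⟩
      have hin : p + 1 ∈ (st.filter (fun p => w.getD p 'a' == lc)).map (· + 1) :=
        hmem1.mpr ⟨p, hmem, he, rfl⟩
      split
      · exact List.mem_append.mpr (Or.inl hin)
      · exact hin

-- main invariant: the automaton run detects exactly an infix occurrence of w
-- in the already-processed characters followed by what A's loop will keep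
theorem matchRun_iff (w : List Char) (hw : w ≠ []) :
    ∀ (cs : List Char) (prev : Option Char) (st : List Nat) (seen : List Char),
    (∀ k, k ∈ st ↔ (1 ≤ k ∧ k < w.length ∧ w.take k <:+ seen)) →
    ¬ w <:+: seen →
    (matchRun w prev st cs = true ↔ w <:+: (seen ++ keepA prev cs)) := by
  intro cs
  induction cs with
  | nil =>
    intro prev st seen hst hni
    simp [matchRun, keepA]
    exact fun h => hni h
  | cons c cs ih =>
    intro prev st seen hst hni
    have hc : (!sepChars.contains c && !(prev == some c))
        = !(sepChars.contains c || prev == some c) := by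
      cases sepChars.contains c <;> cases prev == some c <;> rfl
    by_cases hb : (sepChars.contains c || prev == some c) = true
    · rw [matchRun, hc, hb]
      simp only [Bool.not_true, Bool.false_eq_true, if_false]
      have : keepA prev (c :: cs) = keepA (some c) cs := by
        simp only [keepA]; rw [hb]; simp
      rw [this]
      exact ih (some c) st seen hst hni
    · rw [matchRun, hc, Bool.eq_false_iff.mpr hb]
      simp only [Bool.not_false, if_true]
      have hkeep : keepA prev (c :: cs)
          = [PySem.Chars.lowerChar c] ++ keepA (some c) cs := by
        simp only [keepA]
        rw [Bool.eq_false_iff.mpr hb]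
        simp
      set lc := PySem.Chars.lowerChar c with hlc
      have hstep := step_mem w hw st seen lc hst
      set st2 := (if w.headD 'a' == lc then
          ((st.filter (fun p => w.getD p 'a' == lc)).map (· + 1)) ++ [1]
        else ((st.filter (fun p => w.getD p 'a' == lc)).map (· + 1))) with hst2
      by_cases hfull : st2.contains w.length = true
      · rw [if_pos hfull]
        have hmem : w.length ∈ st2 := by simpa using hfull
        obtain ⟨_, _, hsuf⟩ := (hstep w.length).mp hmem
        rw [List.take_length] at hsuf
        constructor
        · intro _
          rw [hkeep, ← List.append_assoc]
          exact hsuf.isInfix.trans (List.prefix_append _ _).isInfix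
        · intro _; rfl
      · rw [if_neg hfull]
        have hni' : ¬ w <:+: (seen ++ [lc]) := by
          intro h
          rcases (infix_concat_iff w seen lc).mp h with h | h
          · exact hni h
          · have : w.length ∈ st2 := (hstep w.length).mpr
              ⟨List.length_pos_iff.mpr hw, le_refl _, by rwa [List.take_length]⟩
            exact hfull (by simpa using this)
        have hst' : ∀ k, k ∈ st2 ↔ (1 ≤ k ∧ k < w.length ∧ w.take k <:+ (seen ++ [lc])) := by
          intro k
          rw [hstep k]
          constructor
          · rintro ⟨h1, h2, h3⟩
            refine ⟨h1, lt_of_le_of_ne h2 ?_, h3⟩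
            intro hkl; subst hkl
            rw [List.take_length] at h3
            exact hni' ((infix_concat_iff w seen lc).mpr (Or.inr h3))
          · rintro ⟨h1, h2, h3⟩; exact ⟨h1, le_of_lt h2, h3⟩
        rw [ih (some c) st2 (seen ++ [lc]) hst' hni', hkeep, ← List.append_assoc]

theorem matchRun_eq_isIn (w : List Char) (hw : w ≠ []) (cs : List Char) :
    matchRun w none [] cs = PySem.Chars.isIn w (keepA none cs) := by
  have h := matchRun_iff w hw cs none [] []
    (by
      intro k
      simp only [List.not_mem_nil, false_iff]
      rintro ⟨h1, h2, h3⟩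
      rcases List.take_eq_nil_iff.mp (List.eq_nil_of_suffix_nil h3) with h | h
      · omega
      · exact hw h)
    (by
      intro h
      exact hw (List.eq_nil_of_infix_nil h))
  simp only [List.nil_append] at h
  rw [Bool.eq_iff_iff, h, PySem.Chars.isIn_iff_infix]

-- ===== VERDICT (by name: the statement is the Claim_ definition above) =====
theorem is_stressful_spec : Claim_equal_is_stressful := by
  intro subj _
  unfold Spec_is_stressful is_stressful is_stressful_alt
  simp only []
  by_cases hg : (decide (PySem.List.slice subj.toList (some (-3)) none = ['!', '!', '!'])
      || pyStrIsUpper subj.toList) = true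
  · rw [if_pos hg, if_pos hg]
  · rw [if_neg hg, if_neg hg]
    rw [foldl_keep subj.toList [] none]
    simp only [List.nil_append]
    simp only [stressWords, List.any_cons, List.any_nil]
    rw [matchRun_eq_isIn _ (by decide), matchRun_eq_isIn _ (by decide),
        matchRun_eq_isIn _ (by decide)]
    exact if_true_false _
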